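-- pv_equiv track=rewrite | github.com/vincentjanv/anthbot_genie_ha | custom_components/anthbot_genie/api.py | _canonical_uri_for_sigv4
-- ===== SOURCE A (Python) =====
-- def _canonical_uri_for_sigv4(request_uri: str) -> str:
--     """Build SigV4 canonical URI.
--
--     AWS canonicalization requires encoding '%' as '%25', so an already
--     encoded request path (for example '/topics/%24aws%2F...') must be
--     double-encoded only for signing.
--     """
--     encoded: list[str] = []
--     for byte in request_uri.encode("utf-8"):
--         if (
--             0x30 <= byte <= 0x39  # 0-9
--             or 0x41 <= byte <= 0x5A  # A-Z
--             or 0x61 <= byte <= 0x7A  # a-z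
--             or byte in (45, 46, 95, 126, 47)  # - . _ ~ /
--         ):
--             encoded.append(chr(byte))
--         else:
--             encoded.append(f"%{byte:02X}")
--     return "".join(encoded)
-- ===== SOURCE B (Python) =====
-- import re
--
-- _UNSAFE = re.compile(rb"[^A-Za-z0-9_.~/-]")
--
--
-- def _canonical_uri_for_sigv4(request_uri: str) -> str:
--     """Build SigV4 canonical URI by regex substitution.
--
--     The regex engine scans the UTF-8 bytes and replaces every byte outside
--     the unreserved set (plus '/') by its uppercase %XX escape; safe runs
--     are copied through untouched by re.sub.
--     """
--     quoted = _UNSAFE.sub(lambda m: b"%%%02X" % m[0][0], request_uri.encode("utf-8"))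
--     return quoted.decode("ascii")
-- ===== Notes on version B (the rewrite author's own statement) =====
-- stated objective: faster
-- what changed: Replaced the hand-written per-byte loop with range tests and manual %02X formatting by a compiled regex substitution over the UTF-8 bytes: re.sub replaces each byte outside [A-Za-z0-9_.~/-] by its uppercase %XX escape and copies safe runs through untouched in the C regex engine.
import Mathlib
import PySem

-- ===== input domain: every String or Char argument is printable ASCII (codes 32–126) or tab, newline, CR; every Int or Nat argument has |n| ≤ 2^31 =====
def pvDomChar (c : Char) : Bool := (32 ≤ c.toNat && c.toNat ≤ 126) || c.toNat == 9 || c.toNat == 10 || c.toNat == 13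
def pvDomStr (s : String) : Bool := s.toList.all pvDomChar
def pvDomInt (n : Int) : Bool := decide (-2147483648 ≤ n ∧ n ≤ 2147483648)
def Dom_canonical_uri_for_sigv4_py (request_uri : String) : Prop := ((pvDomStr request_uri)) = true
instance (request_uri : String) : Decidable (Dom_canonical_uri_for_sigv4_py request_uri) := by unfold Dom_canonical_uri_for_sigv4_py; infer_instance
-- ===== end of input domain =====

-- B replaces A's hand-written byte loop (range tests + manual %02X) by a
-- compiled regex substitution: re.sub over the UTF-8 bytes replaces every byte
-- matching [^A-Za-z0-9_.~/-] by its uppercase %XX escape (objective: alternative).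
-- On the ASCII domain, iterating over the UTF-8 bytes of the string is exactly
-- iterating over the character codes; both ports use that (exact on Dom).

-- uppercase hex digit (f"%{byte:02X}" on A's side, quote's '%%%02X' on B's)
def pvHexUpper (n : Nat) : Char := "0123456789ABCDEF".toList.getD n '0'

-- ===== PORT A =====
def canonical_uri_for_sigv4_py (request_uri : String) : String :=
  -- 'encoded' accumulator, one appended piece per byte, joined at the end
  let encoded : List String :=
    request_uri.toList.foldl
      (fun acc c =>
        let byte := c.toNat
        if (0x30 ≤ byte ∧ byte ≤ 0x39)
            ∨ (0x41 ≤ byte ∧ byte ≤ 0x5A)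
            ∨ (0x61 ≤ byte ∧ byte ≤ 0x7A)
            ∨ byte ∈ [45, 46, 95, 126, 47] then
          acc ++ [String.singleton c]
        else
          acc ++ [String.mk ['%', pvHexUpper (byte / 16), pvHexUpper (byte % 16)]])
      []
  String.join encoded

-- ===== PORT B =====
-- Source B: _UNSAFE.sub(lambda m: b"%%%02X" % m[0][0], bytes). re.sub with a
-- one-byte negated class substitutes each byte matching the class by its
-- escape and keeps every other byte: ported as that substitution function
-- applied to each byte, concatenated (exact semantics of re.sub here).
def pvClassChars : List Nat :=
  ("ABCDEFGHIJKLMNOPQRSTUVWXYZabcdefghijklmnopqrstuvwxyz0123456789_.-~/").toList.map Char.toNat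

-- the substitution: byte NOT matching [^A-Za-z0-9_.~/-] is kept, else escaped
def pvQuoter (b : Nat) : String :=
  if pvClassChars.contains b then String.singleton (Char.ofNat b)
  else String.mk ['%', pvHexUpper (b / 16), pvHexUpper (b % 16)]

def canonical_uri_for_sigv4_py_alt (request_uri : String) : String :=
  String.join (((request_uri.toList.map Char.toNat).map pvQuoter))

-- ===== PRECONDITION & SPEC =====
def Spec_canonical_uri_for_sigv4_py (request_uri : String) (out : String) : Prop := out = canonical_uri_for_sigv4_py_alt request_uri
instance (request_uri : String) (out : String) : Decidable (Spec_canonical_uri_for_sigv4_py request_uri out) := by unfold Spec_canonical_uri_for_sigv4_py; infer_instance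

-- ===== CLAIM (what is proved, stated in full; the proofs are below) =====
def Claim_equal_canonical_uri_for_sigv4_py : Prop := ∀ (request_uri : String), Dom_canonical_uri_for_sigv4_py request_uri → Spec_canonical_uri_for_sigv4_py request_uri (canonical_uri_for_sigv4_py request_uri)

-- ===== LEMMAS AND PROOFS =====

-- A's piece for one byte, as a function (A's loop appends exactly this)
def pvPieceA (c : Char) : String :=
  let byte := c.toNat
  if (0x30 ≤ byte ∧ byte ≤ 0x39)
      ∨ (0x41 ≤ byte ∧ byte ≤ 0x5A)
      ∨ (0x61 ≤ byte ∧ byte ≤ 0x7A)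
      ∨ byte ∈ [45, 46, 95, 126, 47] then String.singleton c
  else String.mk ['%', pvHexUpper (byte / 16), pvHexUpper (byte % 16)]

theorem pvFoldl_append_piece (l : List Char) (acc : List String) :
    l.foldl (fun acc c => acc ++ [pvPieceA c]) acc = acc ++ l.map pvPieceA := by
  induction l generalizing acc with
  | nil => simp
  | cons c t ih => simp [List.foldl, ih]

-- per-byte agreement, in terms of the byte value only, checked exhaustively
theorem pvPiece_eq_quoter_nat : ∀ n < 127,
    (if (0x30 ≤ n ∧ n ≤ 0x39) ∨ (0x41 ≤ n ∧ n ≤ 0x5A) ∨ (0x61 ≤ n ∧ n ≤ 0x7A)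
        ∨ n ∈ [45, 46, 95, 126, 47] then String.singleton (Char.ofNat n)
     else String.mk ['%', pvHexUpper (n / 16), pvHexUpper (n % 16)]) = pvQuoter n := by
  set_option maxRecDepth 4000 in decide

theorem pvPiece_eq_quoter (c : Char) (h : pvDomChar c = true) :
    pvPieceA c = pvQuoter c.toNat := by
  have hlt : c.toNat < 127 := by
    simp [pvDomChar] at h
    omega
  have := pvPiece_eq_quoter_nat c.toNat hlt
  simpa [pvPieceA, Char.ofNat_toNat] using this

-- ===== VERDICT (by name: the statement is the Claim_ definition above) =====
theorem canonical_uri_for_sigv4_py_spec : Claim_equal_canonical_uri_for_sigv4_py := by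
  intro s hdom
  unfold Spec_canonical_uri_for_sigv4_py
  unfold canonical_uri_for_sigv4_py canonical_uri_for_sigv4_py_alt
  rw [show (fun (acc : List String) (c : Char) =>
        let byte := c.toNat
        if (0x30 ≤ byte ∧ byte ≤ 0x39) ∨ (0x41 ≤ byte ∧ byte ≤ 0x5A)
            ∨ (0x61 ≤ byte ∧ byte ≤ 0x7A) ∨ byte ∈ [45, 46, 95, 126, 47] then
          acc ++ [String.singleton c]
        else acc ++ [String.mk ['%', pvHexUpper (byte / 16), pvHexUpper (byte % 16)]])
      = (fun acc c => acc ++ [pvPieceA c]) from by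
        funext acc c; simp only [pvPieceA]; split <;> rfl]
  rw [pvFoldl_append_piece, List.nil_append, List.map_map]
  show String.join (List.map pvPieceA s.toList) = _
  congr 1
  apply List.map_congr_left
  intro c hc
  have : pvDomChar c = true := by
    have := (List.all_eq_true.mp hdom) c hc
    simpa using this
  simpa [Function.comp] using pvPiece_eq_quoter c this
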